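-- pv_equiv track=rewrite | github.com/nesbittryan/2750-a3 | view.py | sortByAuthor
-- ===== SOURCE A (Python) =====
-- def sortByAuthor(readList, unreadList):
--     combinedList = readList + unreadList
--     authorList = []
--     tempList = []
--     for item in combinedList:
--         if "Stream:" in item:
--             if tempList:
--                 copyList = tempList[:]
--                 authorList.append(copyList)
--                 tempList[:] = []
--         tempList.append(item)
--     if tempList:
--         copyList = tempList[:]
--         authorList.append(copyList)
--
--     authorList.sort(key=lambda x: x[1])
--     finalList = []
--     for l in authorList:
--         for item in l:
--             finalList.append(item)
--     return finalList
-- ===== SOURCE B (Python) =====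
-- def sortByAuthor(readList, unreadList):
--     combined = readList + unreadList
--     groups = []
--     rest = combined
--     while rest:
--         head, tail = rest[0], rest[1:]
--         k = 0
--         while k < len(tail) and "Stream:" not in tail[k]:
--             k += 1
--         groups.append([head] + tail[:k])
--         rest = tail[k:]
--     groups.sort(key=lambda g: g[1])
--     out = []
--     for g in groups:
--         out.extend(g)
--     return out
-- ===== Notes on version B (the rewrite author's own statement) =====
-- stated objective: alternative
-- what changed: A builds groups in one accumulator-driven pass (flushing a temp list at each 'Stream:' marker); B instead splits the combined list recursively into head-plus-scan-to-next-marker slices (two-pointer scan), then sorts the slices by their second element and flattens with extend.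
import Mathlib
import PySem

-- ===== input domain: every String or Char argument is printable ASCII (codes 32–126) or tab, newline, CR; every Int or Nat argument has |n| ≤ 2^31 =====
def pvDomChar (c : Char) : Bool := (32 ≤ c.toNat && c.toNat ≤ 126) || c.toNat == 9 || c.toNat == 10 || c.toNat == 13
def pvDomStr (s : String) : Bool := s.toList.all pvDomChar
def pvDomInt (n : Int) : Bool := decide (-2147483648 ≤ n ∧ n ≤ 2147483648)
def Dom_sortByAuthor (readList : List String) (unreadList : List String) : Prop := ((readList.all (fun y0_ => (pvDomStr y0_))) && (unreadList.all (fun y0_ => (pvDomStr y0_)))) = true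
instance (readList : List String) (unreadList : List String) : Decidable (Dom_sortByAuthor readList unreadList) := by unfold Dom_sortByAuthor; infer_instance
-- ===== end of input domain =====

-- B replaces A's accumulator-driven grouping pass by a recursive head-then-scan split into group
-- slices (alternative decomposition, same cost); sort key and flatten behaviour are unchanged.


-- ===== PORT A =====
-- loop body: if "Stream:" in item: (if tempList: flush tempList into authorList); tempList.append(item)
def pvAStep (st : List (List String) × List String) (item : String) : List (List String) × List String :=
  let st1 := if PySem.Str.isIn "Stream:" item then
               (if st.2 ≠ [] then (st.1 ++ [st.2], ([] : List String)) else st)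
             else st
  (st1.1, st1.2 ++ [item])

def sortByAuthor (readList : List String) (unreadList : List String) : List String :=
  let combinedList := readList ++ unreadList
  let st := combinedList.foldl pvAStep ([], [])
  let authorList := if st.2 ≠ [] then st.1 ++ [st.2] else st.1
  -- key x[1]: pyGetD (total form); Pre_ guarantees every group has ≥ 2 items (Python raises IndexError otherwise)
  let sortedList := PySem.List.sorted authorList (fun x => PySem.List.pyGetD x 1 "") false
  sortedList.foldl (fun acc l => l.foldl (fun acc2 item => acc2 ++ [item]) acc) []

-- ===== PORT B =====
-- Source B's outer while: take rest[0], scan the tail for the next marker (inner while = takeWhile),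
-- emit the slice tail[:k] behind the head, recurse on rest = tail[k:] (= dropWhile)
def pvBGroups : List String → List (List String)
  | [] => []
  | head :: tail =>
    (head :: tail.takeWhile (fun x => !PySem.Str.isIn "Stream:" x)) ::
      pvBGroups (tail.dropWhile (fun x => !PySem.Str.isIn "Stream:" x))
termination_by l => l.length
decreasing_by
  exact Nat.lt_succ_of_le (List.length_dropWhile_le _ _)

def sortByAuthor_alt (readList : List String) (unreadList : List String) : List String :=
  let groups := pvBGroups (readList ++ unreadList)
  (PySem.List.sorted groups (fun g => PySem.List.pyGetD g 1 "") false).foldl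
    (fun out g => out ++ g) []

-- ===== PRECONDITION & SPEC =====
-- Pre_ excludes exactly the inputs where Python A raises IndexError on the sort key x[1]:
-- some group would have a single item (a lone leading item or singleton list, a marker followed
-- immediately by another marker, or a marker that is the last item).
def Pre_sortByAuthor (readList : List String) (unreadList : List String) : Prop :=
  let c := readList ++ unreadList
  (c = [] ∨ (1 < c.length ∧ PySem.Str.isIn "Stream:" (c.getD 1 "") = false)) ∧
  ∀ i : Fin c.length, PySem.Str.isIn "Stream:" (c.get i) = true →
    i.1 + 1 < c.length ∧ PySem.Str.isIn "Stream:" (c.getD (i.1 + 1) "") = false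
instance (readList : List String) (unreadList : List String) : Decidable (Pre_sortByAuthor readList unreadList) := by
  unfold Pre_sortByAuthor; infer_instance

def pvWitness_sortByAuthor : List String × List String := (["Stream: s1", "alice"], ["Stream: s2", "bob"])

def Spec_sortByAuthor (readList : List String) (unreadList : List String) (out : List String) : Prop := out = sortByAuthor_alt readList unreadList
instance (readList : List String) (unreadList : List String) (out : List String) : Decidable (Spec_sortByAuthor readList unreadList out) := by unfold Spec_sortByAuthor; infer_instance

-- ===== CLAIM (what is proved, stated in full; the proofs are below) =====
def Claim_equal_sortByAuthor : Prop := ∀ (readList : List String) (unreadList : List String), Dom_sortByAuthor readList unreadList → Pre_sortByAuthor readList unreadList → Spec_sortByAuthor readList unreadList (sortByAuthor readList unreadList)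

-- ===== LEMMAS AND PROOFS =====

lemma pvBGroups_nil : pvBGroups [] = [] := by rw [pvBGroups.eq_def]

lemma pvBGroups_cons (h : String) (t : List String) :
    pvBGroups (h :: t) = (h :: t.takeWhile (fun x => !PySem.Str.isIn "Stream:" x)) ::
      pvBGroups (t.dropWhile (fun x => !PySem.Str.isIn "Stream:" x)) := by
  rw [pvBGroups.eq_def]

-- A's grouping fold, started with a non-empty pending group, produces exactly: the groups already
-- emitted, the pending group extended to the next marker, then B's groups of the rest.
lemma pvA_fold_eq (c : List String) : ∀ (al : List (List String)) (tl : List String), tl ≠ [] →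
    (let st := c.foldl pvAStep (al, tl);
     if st.2 ≠ [] then st.1 ++ [st.2] else st.1)
      = al ++ (tl ++ c.takeWhile (fun x => !PySem.Str.isIn "Stream:" x)) ::
          pvBGroups (c.dropWhile (fun x => !PySem.Str.isIn "Stream:" x)) := by
  induction c with
  | nil => intro al tl htl; simp [pvBGroups_nil, htl]
  | cons x c' ih =>
    intro al tl htl
    by_cases hm : PySem.Str.isIn "Stream:" x = true
    · have hm' : PySem.Chars.isIn ['S','t','r','e','a','m',':'] x.toList = true := by
        simpa using hm
      have hstep : pvAStep (al, tl) x = (al ++ [tl], [x]) := by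
        simp [pvAStep, hm', htl]
      rw [List.foldl_cons, hstep, ih (al ++ [tl]) [x] (by simp),
        List.takeWhile_cons_of_neg (by simpa using hm), List.dropWhile_cons_of_neg (by simpa using hm),
        pvBGroups_cons]
      simp
    · have hm' : PySem.Chars.isIn ['S','t','r','e','a','m',':'] x.toList = false := by
        simpa using hm
      have hstep : pvAStep (al, tl) x = (al, tl ++ [x]) := by
        simp [pvAStep, hm']
      rw [List.foldl_cons, hstep, ih al (tl ++ [x]) (by simp),
        List.takeWhile_cons_of_pos (by simpa using hm), List.dropWhile_cons_of_pos (by simpa using hm)]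
      simp

lemma pvA_groups_eq (c : List String) :
    (let st := c.foldl pvAStep ([], []);
     if st.2 ≠ [] then st.1 ++ [st.2] else st.1) = pvBGroups c := by
  cases c with
  | nil => exact pvBGroups_nil.symm ▸ rfl
  | cons x c' =>
    have hstep : pvAStep (([] : List (List String)), ([] : List String)) x = ([], [x]) := by
      simp [pvAStep]
    rw [List.foldl_cons, hstep, pvA_fold_eq c' [] [x] (by simp), pvBGroups_cons]
    simp

-- ===== VERDICT (by name: the statement is the Claim_ definition above) =====
theorem sortByAuthor_spec : Claim_equal_sortByAuthor := by
  intro readList unreadList _ _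
  show sortByAuthor readList unreadList = sortByAuthor_alt readList unreadList
  unfold sortByAuthor sortByAuthor_alt
  simp only [pvA_groups_eq, PySem.List.foldl_append_singleton]
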